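-- pv_equiv track=rewrite | github.com/pi0trek8/Adder | parallelPrefixStage.py | get_parallel_prefix_nodes_positions
-- ===== SOURCE A (Python) =====
-- def parse_to_binary(number: int, number_of_bits: int):
--     binary_number = [0] * number_of_bits
--     index = 0
--     while number > 0 and index < number_of_bits:
--         binary_number[index] = number % 2
--         number //= 2
--         index += 1
--     return binary_number
--
-- def get_parallel_prefix_nodes_positions(rows_number: int, length: int) -> list:
--     result = [[0] * length for i in range(rows_number)]
--
--     for row_num in range(rows_number):
--         for position in range(length):
--             bin_num = parse_to_binary(position, rows_number)
--             if bin_num[row_num] == 1: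
--                 result[row_num][position] = 1
--     return result
-- ===== SOURCE B (Python) =====
-- def get_parallel_prefix_nodes_positions(rows_number: int, length: int) -> list:
--     # Row r of the matrix is periodic with period 2**(r+1): a block of 2**r zeros
--     # followed by a block of 2**r ones.  Build each row by tiling that pattern,
--     # instead of computing anything per cell.  Once the block covers the whole
--     # row (2**r >= length) the row is all zeros, so the block stops growing.
--     n = max(length, 0)
--     result = []
--     block = 1
--     for _ in range(rows_number):
--         if block >= n:
--             result.append([0] * n)
--         else:
--             pattern = [0] * block + [1] * block
--             reps = (n + 2 * block - 1) // (2 * block)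
--             result.append((pattern * reps)[:n])
--             block *= 2
--     return result
-- ===== Notes on version B (the rewrite author's own statement) =====
-- stated objective: faster
-- what changed: B exploits that row r is periodic (2^r zeros then 2^r ones, repeating): each row is built by tiling that pattern with list repetition and truncating, so there is no per-cell computation at all, while A rebuilds the full rows_number-long binary expansion of the position for every cell.
import Mathlib
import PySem

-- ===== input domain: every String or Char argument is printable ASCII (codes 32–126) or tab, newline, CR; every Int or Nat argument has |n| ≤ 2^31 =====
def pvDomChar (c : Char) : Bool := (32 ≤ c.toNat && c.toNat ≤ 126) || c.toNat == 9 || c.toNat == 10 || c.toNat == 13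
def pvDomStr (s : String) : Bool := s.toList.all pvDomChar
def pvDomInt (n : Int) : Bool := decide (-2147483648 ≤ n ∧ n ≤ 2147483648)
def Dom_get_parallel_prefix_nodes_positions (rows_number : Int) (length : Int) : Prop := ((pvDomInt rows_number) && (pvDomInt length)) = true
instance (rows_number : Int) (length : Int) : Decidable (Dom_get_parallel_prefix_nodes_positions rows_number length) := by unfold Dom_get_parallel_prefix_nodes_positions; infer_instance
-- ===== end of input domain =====

-- B builds each row by tiling its periodic pattern (2^r zeros then 2^r ones) instead of
-- computing each cell from a per-cell binary expansion (asymptotically faster).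

-- ===== PORT A =====

-- the 'while number > 0 and index < number_of_bits' loop of parse_to_binary
def parse_to_binary_loop (binary_number : List Int) (number : Int) (index : Nat)
    (number_of_bits : Nat) : List Int :=
  if number > 0 ∧ index < number_of_bits then
    parse_to_binary_loop (binary_number.set index (PySem.Int.mod number 2))
      (PySem.Int.floordiv number 2) (index + 1) number_of_bits
  else binary_number
termination_by number_of_bits - index
decreasing_by omega

def parse_to_binary (number : Int) (number_of_bits : Int) : List Int :=
  parse_to_binary_loop (List.replicate number_of_bits.toNat 0) number 0 number_of_bits.toNat

def get_parallel_prefix_nodes_positions (rows_number : Int) (length : Int) : List (List Int) :=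
  let result := (PySem.List.pyRange 0 rows_number 1).map (fun _ => List.replicate length.toNat 0)
  (PySem.List.pyRange 0 rows_number 1).foldl (fun result row_num =>
    (PySem.List.pyRange 0 length 1).foldl (fun result position =>
      let bin_num := parse_to_binary position rows_number
      -- bin_num[row_num]: always in range (0 ≤ row_num < rows_number = len bin_num)
      if PySem.List.pyGetD bin_num row_num 0 = 1 then
        -- result[row_num][position] = 1
        result.modify row_num.toNat (fun r => r.set position.toNat 1)
      else result) result) result

-- ===== PORT B =====

-- one loop body of Source B: pattern = [0]*block + [1]*block; (pattern * reps)[:n]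
-- (the slice [:n] is List.take n.toNat exactly because n = max(length,0) ≥ 0)
def pvAltRow (block : Int) (n : Int) : List Int :=
  let pattern := List.replicate block.toNat 0 ++ List.replicate block.toNat 1
  let reps := PySem.Int.floordiv (n + 2 * block - 1) (2 * block)
  (List.flatten (List.replicate reps.toNat pattern)).take n.toNat

-- the 'for _ in range(rows_number)' loop with its accumulator `block` (doubling while block < n)
def pvAltLoop : Nat → Int → Int → List (List Int)
  | 0, _, _ => []
  | k + 1, block, n =>
    if n ≤ block then List.replicate n.toNat 0 :: pvAltLoop k block n
    else pvAltRow block n :: pvAltLoop k (block * 2) n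

def get_parallel_prefix_nodes_positions_alt (rows_number : Int) (length : Int) : List (List Int) :=
  pvAltLoop rows_number.toNat 1 (max length 0)

-- ===== PRECONDITION & SPEC =====
def Spec_get_parallel_prefix_nodes_positions (rows_number : Int) (length : Int) (out : List (List Int)) : Prop := out = get_parallel_prefix_nodes_positions_alt rows_number length
instance (rows_number : Int) (length : Int) (out : List (List Int)) : Decidable (Spec_get_parallel_prefix_nodes_positions rows_number length out) := by unfold Spec_get_parallel_prefix_nodes_positions; infer_instance

-- ===== CLAIM (what is proved, stated in full; the proofs are below) =====
def Claim_equal_get_parallel_prefix_nodes_positions : Prop := ∀ (rows_number : Int) (length : Int), Dom_get_parallel_prefix_nodes_positions rows_number length → Spec_get_parallel_prefix_nodes_positions rows_number length (get_parallel_prefix_nodes_positions rows_number length)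

-- ===== LEMMAS AND PROOFS =====

-- entries of the parse_to_binary loop: positions ≥ index hold the bits of `number`
lemma parseLoop_getElem? (bits : Nat) : ∀ (k idx : Nat) (arr : List Int) (n : Int),
    bits - idx = k → arr.length = bits → 0 ≤ n →
    (∀ j, idx ≤ j → j < bits → arr[j]? = some 0) →
    ∀ j, j < bits →
      (parse_to_binary_loop arr n idx bits)[j]? =
        if j < idx then arr[j]? else some (((n.toNat >>> (j - idx)) &&& 1 : Nat) : Int) := by
  intro k
  induction k with
  | zero =>
    intro idx arr n hk hlen hn h0 j hj
    rw [parse_to_binary_loop, if_neg (by omega)]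
    rw [if_pos (by omega)]
  | succ k ih =>
    intro idx arr n hk hlen hn h0 j hj
    rw [parse_to_binary_loop]
    by_cases hpos : n > 0
    · rw [if_pos ⟨hpos, by omega⟩]
      have hdiv : PySem.Int.floordiv n 2 = n / 2 := PySem.Int.floordiv_eq_ediv_of_pos (by omega)
      have hrec := ih (idx + 1) (arr.set idx (PySem.Int.mod n 2)) (PySem.Int.floordiv n 2)
        (by omega) (by simpa using hlen)
        (by rw [hdiv]; exact Int.ediv_nonneg hn (by omega))
        (by
          intro j' hj1 hj2
          rw [List.getElem?_set, if_neg (by omega)]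
          exact h0 j' (by omega) hj2)
        j hj
      rw [hrec]
      by_cases hji : j < idx
      · rw [if_pos (by omega), if_pos hji, List.getElem?_set, if_neg (by omega)]
      · by_cases hje : j = idx
        · subst hje
          rw [if_pos (by omega), if_neg hji, List.getElem?_set, if_pos rfl,
            if_pos (by omega)]
          have hmod : PySem.Int.mod n 2 = n % 2 := PySem.Int.mod_eq_emod_of_pos (by omega)
          have : ((n.toNat >>> (j - j)) &&& 1 : Nat) = n.toNat % 2 := by
            simp [Nat.and_one_is_mod]
          rw [this, hmod]
          congr 1
          omega
        · rw [if_neg (by omega), if_neg hji]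
          congr 2
          have h2 : (PySem.Int.floordiv n 2).toNat = n.toNat / 2 := by
            rw [hdiv]; omega
          rw [h2]
          have : j - idx = (j - (idx + 1)) + 1 := by omega
          rw [this]
          have : n.toNat >>> (j - (idx + 1) + 1) = (n.toNat >>> 1) >>> (j - (idx + 1)) := by
            rw [← Nat.shiftRight_add]; congr 1; omega
          rw [this, Nat.shiftRight_one]
    · rw [if_neg (by tauto)]
      have hn0 : n = 0 := by omega
      by_cases hji : j < idx
      · rw [if_pos hji]
      · rw [if_neg hji, h0 j (by omega) hj]
        simp [hn0]

-- bin_num[r] is bit r of the (nonnegative) number, for r < number_of_bits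
lemma parse_bit (p rows : Int) (r : Nat) (hp : 0 ≤ p) (hr : (r : Int) < rows) :
    PySem.List.pyGetD (parse_to_binary p rows) (r : Int) 0 =
      (((p.toNat >>> r) &&& 1 : Nat) : Int) := by
  rw [PySem.List.pyGetD_natCast]
  unfold parse_to_binary
  have h := parseLoop_getElem? rows.toNat (rows.toNat) 0 (List.replicate rows.toNat 0) p
    (by omega) (by simp) hp
    (by intro j _ hj; simp [hj])
    r (by omega)
  rw [List.getD_eq_getElem?_getD, h, if_neg (by omega)]
  simp

-- (l.modify i f).modify i g collapses to one modify
lemma list_modify_modify {α : Type} (l : List α) (i : Nat) (f g : α → α) :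
    (l.modify i f).modify i g = l.modify i (fun a => g (f a)) := by
  apply List.ext_getElem?
  intro j
  simp only [List.getElem?_modify]
  cases l[j]?
  · rfl
  · by_cases h : i = j <;> simp [h]

-- a fold whose every step modifies the SAME row is one modify of that row
lemma foldl_modify_comm {c : Int → Prop} [DecidablePred c] (r : Nat)
    (g : Int → List Int → List Int) :
    ∀ (ps : List Int) (res : List (List Int)),
      ps.foldl (fun acc p => if c p then acc.modify r (g p) else acc) res
        = res.modify r (fun row => ps.foldl (fun row p => if c p then g p row else row) row) := by
  intro ps
  induction ps with
  | nil =>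
    intro res
    apply List.ext_getElem?
    intro j
    simp [List.getElem?_modify]
  | cons p ps ih =>
    intro res
    by_cases hc : c p
    · simp only [List.foldl_cons, if_pos hc, ih, list_modify_modify]
    · simp only [List.foldl_cons, if_neg hc, ih]

-- a fold over range R where step r modifies row r: row i (i < R) gets F i applied once
lemma foldl_range_modify {α : Type} (F : Nat → α → α) :
    ∀ (R : Nat) (init : List α) (i : Nat),
      ((List.range R).foldl (fun res r => res.modify r (F r)) init)[i]? =
        if i < R then (init[i]?).map (F i) else init[i]? := by
  intro R
  induction R with
  | zero => intro init i; simp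
  | succ R ih =>
    intro init i
    rw [List.range_succ, List.foldl_append, List.foldl_cons, List.foldl_nil,
      List.getElem?_modify, ih]
    by_cases hi : i = R
    · subst hi
      rw [if_neg (by omega), if_pos (by omega)]
      cases init[i]? <;> simp
    · have hi' : ¬R = i := fun h => hi h.symm
      by_cases hiR : i < R
      · rw [if_pos hiR, if_pos (by omega)]
        cases init[i]? <;> simp [hi']
      · rw [if_neg hiR, if_neg (by omega)]
        cases init[i]? <;> simp [hi']

-- setting to 1 exactly the positions p < m with c p, starting from any row
lemma rowfold_getElem? {c : Int → Prop} [DecidablePred c] :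
    ∀ (m : Nat) (row : List Int) (j : Nat),
      ((List.map (fun k : Nat => (k : Int)) (List.range m)).foldl
          (fun row p => if c p then row.set p.toNat 1 else row) row)[j]? =
        if j < m ∧ j < row.length ∧ c (j : Int) then some 1 else row[j]? := by
  intro m
  induction m with
  | zero => intro row j; simp
  | succ m ih =>
    intro row j
    rw [List.range_succ, List.map_append, List.foldl_append, List.map_cons, List.map_nil,
      List.foldl_cons, List.foldl_nil]
    have hlen : ∀ (ps : List Int) (row : List Int),
        (ps.foldl (fun row p => if c p then row.set p.toNat 1 else row) row).length
          = row.length := by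
      intro ps
      induction ps with
      | nil => intro row; rfl
      | cons p ps ihp => intro row; rw [List.foldl_cons]; split_ifs <;> simp [ihp]
    by_cases hc : c (m : Int)
    · rw [if_pos hc, List.getElem?_set]
      simp only [Int.toNat_natCast]
      by_cases hj : j = m
      · subst hj
        rw [if_pos rfl, hlen]
        by_cases hjl : j < row.length
        · rw [if_pos hjl, if_pos ⟨by omega, hjl, hc⟩]
        · rw [if_neg hjl, if_neg (by tauto)]
          exact (List.getElem?_eq_none (by omega)).symm
      · rw [if_neg (Ne.symm hj), ih]
        by_cases h1 : j < m ∧ j < row.length ∧ c (j : Int)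
        · rw [if_pos h1, if_pos ⟨by omega, h1.2⟩]
        · rw [if_neg h1, if_neg (by rintro ⟨a, b, d⟩; exact h1 ⟨by omega, b, d⟩)]
    · rw [if_neg hc, ih]
      by_cases h1 : j < m ∧ j < row.length ∧ c (j : Int)
      · rw [if_pos h1, if_pos ⟨by omega, h1.2⟩]
      · rw [if_neg h1, if_neg (by
          rintro ⟨a, b, d⟩
          apply h1
          refine ⟨?_, b, d⟩
          rcases Nat.lt_succ_iff_lt_or_eq.mp a with h | h
          · exact h
          · exact absurd (h ▸ d) hc)]

-- the bit value is 0 or 1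
lemma bit_le_one (x r : Nat) : (x >>> r) &&& 1 = 0 ∨ (x >>> r) &&& 1 = 1 := by
  rw [Nat.and_one_is_mod]
  omega

-- the matrix of bits, row-major: cell (r, j) is bit r of j (proof-only intermediate form)
def pvBits (rows_number : Int) (length : Int) : List (List Int) :=
  (PySem.List.pyRange 0 rows_number 1).map (fun row =>
    (PySem.List.pyRange 0 length 1).map (fun position =>
      (((position.toNat >>> row.toNat) &&& 1 : Nat) : Int)))

theorem a_eq_bits (rows_number : Int) (length : Int) :
    get_parallel_prefix_nodes_positions rows_number length = pvBits rows_number length := by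
  unfold get_parallel_prefix_nodes_positions pvBits
  simp only [PySem.List.pyRange_one, Int.sub_zero, zero_add]
  rw [show (fun (result : List (List Int)) (row_num : Int) =>
        (List.map (fun k : Nat => (k : Int)) (List.range length.toNat)).foldl
          (fun result position =>
            let bin_num := parse_to_binary position rows_number
            if PySem.List.pyGetD bin_num row_num 0 = 1 then
              result.modify row_num.toNat (fun r => r.set position.toNat 1)
            else result) result)
      = (fun (result : List (List Int)) (row_num : Int) =>
          result.modify row_num.toNat (fun row =>
            (List.map (fun k : Nat => (k : Int)) (List.range length.toNat)).foldl
              (fun row position =>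
                if PySem.List.pyGetD (parse_to_binary position rows_number) row_num 0 = 1 then
                  row.set position.toNat 1
                else row) row))
      from funext fun res => funext fun r =>
        foldl_modify_comm r.toNat (fun p row => row.set p.toNat 1) _ res]
  rw [List.foldl_map]
  simp only [Int.toNat_natCast]
  apply List.ext_getElem?
  intro i
  rw [foldl_range_modify]
  by_cases hi : i < rows_number.toNat
  · rw [if_pos hi]
    simp only [List.getElem?_map, List.getElem?_range, hi, Option.map_some]
    congr 1
    apply List.ext_getElem?
    intro j
    rw [rowfold_getElem?]
    simp only [List.getElem?_map, List.length_replicate,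
      List.getElem?_replicate, Int.toNat_natCast]
    by_cases hj : j < length.toNat
    · have hr : (List.range length.toNat)[j]? = some j := by simp [hj]
      rw [hr]
      have hbit := parse_bit (j : Int) rows_number i (by omega) (by omega)
      simp only [Int.toNat_natCast] at hbit
      rcases bit_le_one j i with h | h
      · rw [if_neg (by rintro ⟨-, -, hc⟩; rw [hbit, h] at hc; simp at hc), if_pos hj]
        simp only [Option.map_some, Int.toNat_natCast, h]
        simp
      · rw [if_pos ⟨hj, hj, by rw [hbit, h]; simp⟩]
        simp only [Option.map_some, Int.toNat_natCast, h]
        simp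
    · simp [hj]
  · rw [if_neg hi]
    simp [hi]

-- elements of a tiled list: position j (inside the tiling) reads the pattern at j mod its length
lemma flatten_replicate_getElem? {α : Type} (p : List α) (hp : p ≠ []) :
    ∀ (m j : Nat), j < m * p.length →
      (List.flatten (List.replicate m p))[j]? = p[j % p.length]? := by
  intro m
  induction m with
  | zero => intro j hj; omega
  | succ m ih =>
    intro j hj
    have hL : 0 < p.length := List.length_pos_of_ne_nil hp
    have hmul : (m + 1) * p.length = m * p.length + p.length := Nat.succ_mul m p.length
    rw [hmul] at hj
    rw [List.replicate_succ, List.flatten_cons, List.getElem?_append]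
    by_cases h : j < p.length
    · rw [if_pos h, Nat.mod_eq_of_lt h]
    · rw [if_neg h, ih (j - p.length) (by omega)]
      conv_rhs => rw [Nat.mod_eq_sub_mod (by omega : j ≥ p.length)]

-- one B row, with block = 2^s, is the row of bit s of each position
lemma altRow_bits (s : Nat) (n : Int) (hn : 0 ≤ n) :
    pvAltRow ((2 ^ s : Nat) : Int) n
      = (List.range n.toNat).map (fun j => (((j >>> s) &&& 1 : Nat) : Int)) := by
  have hB : 0 < 2 ^ s := Nat.two_pow_pos s
  have hB1 : (1 : Int) ≤ ((2 ^ s : Nat) : Int) := by exact_mod_cast hB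
  have hd : (0 : Int) < 2 * ((2 ^ s : Nat) : Int) := by linarith
  have hfd : PySem.Int.floordiv (n + 2 * ((2 ^ s : Nat) : Int) - 1) (2 * ((2 ^ s : Nat) : Int))
      = (n + 2 * ((2 ^ s : Nat) : Int) - 1) / (2 * ((2 ^ s : Nat) : Int)) :=
    PySem.Int.floordiv_eq_ediv_of_pos hd
  set a : Int := n + 2 * ((2 ^ s : Nat) : Int) - 1 with ha
  set d : Int := 2 * ((2 ^ s : Nat) : Int) with hdd
  have ha0 : 0 ≤ a := by omega
  have hq0 : 0 ≤ a / d := Int.ediv_nonneg ha0 (le_of_lt hd)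
  -- the ceiling reps covers n : n ≤ reps * d
  have hcover : n ≤ (a / d) * d := by
    have h1 := Int.lt_ediv_add_one_mul_self a hd
    have h2 : (a / d + 1) * d = (a / d) * d + d := by ring
    rw [h2] at h1
    omega
  set pat : List Int := List.replicate ((2 ^ s : Nat) : Int).toNat 0
      ++ List.replicate ((2 ^ s : Nat) : Int).toNat 1 with hpat
  have hpatlen : pat.length = 2 ^ s + 2 ^ s := by
    simp only [hpat, List.length_append, List.length_replicate, Int.toNat_natCast]
  have hpatne : pat ≠ [] := by
    intro h
    have := congrArg List.length h
    rw [hpatlen] at this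
    simp at this
  have hq : (((a / d).toNat : Nat) : Int) = a / d := Int.toNat_of_nonneg hq0
  -- the Nat-side bound: n.toNat ≤ reps.toNat * pattern length
  have hcovN : n.toNat ≤ (a / d).toNat * (2 ^ s + 2 ^ s) := by
    have hcast : (((a / d).toNat * (2 ^ s + 2 ^ s) : Nat) : Int) = (a / d) * d := by
      push_cast
      rw [hq, hdd]
      push_cast
      ring
    apply Int.toNat_le.mpr
    rw [hcast]
    exact hcover
  show (List.flatten (List.replicate (PySem.Int.floordiv (n + d - 1) d).toNat pat)).take n.toNat
      = (List.range n.toNat).map (fun j => (((j >>> s) &&& 1 : Nat) : Int))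
  rw [hfd]
  apply List.ext_getElem?
  intro j
  rw [List.getElem?_take, List.getElem?_map]
  by_cases hj : j < n.toNat
  · rw [if_pos hj, List.getElem?_range hj, Option.map_some,
      flatten_replicate_getElem? pat hpatne _ j (by rw [hpatlen]; omega), hpatlen]
    -- the bit is the pattern entry at j mod the period
    have hlt : j % (2 ^ s + 2 ^ s) < 2 ^ s + 2 ^ s := Nat.mod_lt _ (by omega)
    have hbit : (j >>> s) &&& 1 = (j % (2 ^ s * 2)) / 2 ^ s := by
      rw [Nat.shiftRight_eq_div_pow, Nat.and_one_is_mod, Nat.mod_mul_right_div_self]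
    have hper : 2 ^ s + 2 ^ s = 2 ^ s * 2 := by ring
    rw [hpat, List.getElem?_append]
    simp only [List.length_replicate, Int.toNat_natCast, List.getElem?_replicate]
    by_cases hlo : j % (2 ^ s + 2 ^ s) < 2 ^ s
    · rw [if_pos hlo, if_pos hlo]
      have : (j >>> s) &&& 1 = 0 := by
        rw [hbit, ← hper]
        exact Nat.div_eq_of_lt hlo
      simp [this]
    · rw [if_neg hlo, if_pos (by omega)]
      have : (j >>> s) &&& 1 = 1 := by
        rw [hbit, ← hper]
        exact Nat.div_eq_of_lt_le (by omega) (by omega)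
      simp [this]
  · rw [if_neg hj, List.getElem?_eq_none (by simpa using hj), Option.map_none]

-- bit r of j is 0 once j < 2^r: rows past the top bit are all zeros
lemma bitrow_zero (m r : Nat) (hm : m ≤ 2 ^ r) :
    (List.range m).map (fun j => (((j >>> r) &&& 1 : Nat) : Int))
      = List.replicate m 0 := by
  rw [List.eq_replicate_iff]
  constructor
  · simp
  · intro b hb
    rcases List.mem_map.mp hb with ⟨j, hj, rfl⟩
    rw [List.mem_range] at hj
    rw [Nat.shiftRight_eq_div_pow, Nat.div_eq_of_lt (by omega)]
    simp

-- once saturated (n ≤ block) the loop emits only zero rows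
lemma altLoop_saturated (n block : Int) (h : n ≤ block) : ∀ (k : Nat),
    pvAltLoop k block n = List.replicate k (List.replicate n.toNat 0) := by
  intro k
  induction k with
  | zero => simp [pvAltLoop]
  | succ k ih => rw [pvAltLoop, if_pos h, ih, List.replicate_succ]

-- the B loop starting at block = 2^s lists the bit-rows s, s+1, …
lemma altLoop_bits (n : Int) (hn : 0 ≤ n) : ∀ (k s : Nat),
    pvAltLoop k ((2 ^ s : Nat) : Int) n
      = (List.range' s k).map (fun r =>
          (List.range n.toNat).map (fun j => (((j >>> r) &&& 1 : Nat) : Int))) := by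
  intro k
  induction k with
  | zero => intro s; simp [pvAltLoop]
  | succ k ih =>
    intro s
    by_cases hsat : n ≤ ((2 ^ s : Nat) : Int)
    · rw [altLoop_saturated n _ hsat]
      have hzero : ∀ r, s ≤ r →
          (List.range n.toNat).map (fun j => (((j >>> r) &&& 1 : Nat) : Int))
            = List.replicate n.toNat 0 := by
        intro r hr
        apply bitrow_zero
        have h1 : n.toNat ≤ 2 ^ s := by omega
        exact le_trans h1 (Nat.pow_le_pow_right (by omega) hr)
      symm
      rw [List.eq_replicate_iff]
      constructor
      · simp
      · intro b hb
        rcases List.mem_map.mp hb with ⟨r, hr, rfl⟩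
        rcases List.mem_range'.mp hr with ⟨i, _, rfl⟩
        exact hzero (s + 1 * i) (by omega)
    · have hstep : ((2 ^ s : Nat) : Int) * 2 = ((2 ^ (s + 1) : Nat) : Int) := by
        push_cast
        ring
      rw [pvAltLoop, if_neg hsat, hstep, ih (s + 1), List.range'_succ, List.map_cons,
        altRow_bits s n hn]

theorem a_eq_alt (rows_number : Int) (length : Int) :
    get_parallel_prefix_nodes_positions rows_number length
      = get_parallel_prefix_nodes_positions_alt rows_number length := by
  have halt : get_parallel_prefix_nodes_positions_alt rows_number length
      = (List.range' 0 rows_number.toNat).map (fun r =>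
          (List.range (max length 0).toNat).map (fun j => (((j >>> r) &&& 1 : Nat) : Int))) := by
    unfold get_parallel_prefix_nodes_positions_alt
    rw [show (1 : Int) = ((2 ^ 0 : Nat) : Int) from by norm_num]
    exact altLoop_bits (max length 0) (le_max_right _ _) rows_number.toNat 0
  rw [a_eq_bits, halt, ← List.range_eq_range',
    show (max length 0).toNat = length.toNat from by omega]
  unfold pvBits
  simp only [PySem.List.pyRange_one, Int.sub_zero, zero_add, List.map_map]
  apply List.map_congr_left
  intro r _
  simp [Function.comp_def]

-- ===== VERDICT (by name: the statement is the Claim_ definition above) =====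
theorem get_parallel_prefix_nodes_positions_spec : Claim_equal_get_parallel_prefix_nodes_positions := by
  intro rows_number length _
  unfold Spec_get_parallel_prefix_nodes_positions
  exact a_eq_alt rows_number length
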